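-- pv_equiv track=rewrite | github.com/gregarendse/adventofcode | 2023/11/main.py | expand_image
-- ===== SOURCE A (Python) =====
-- from typing import List, Set, Tuple
--
-- def expand_image(image: List[List[str]]):
--     expanded_image: list[list[str]] = []
--
--     for y in image:
--         expanded_image.append(list(y))
--         if len(set(y)) == 1:
--             expanded_image.append(list(y))
--
--     for i in reversed(range(len(image[0]))):
--
--         expand: bool = True
--         for j in range(len(image)):
--             if image[j][i] != '.':
--                 expand = False
--                 break
--
--         if expand:
--             for j in range(len(expanded_image)):
--                 expanded_image[j].insert(i, '.')
--
--     return expanded_image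
-- ===== SOURCE B (Python) =====
-- from typing import List
--
-- def expand_image(image: List[List[str]]):
--     w = len(image[0])
--     cols = [all(row[i] == '.' for row in image) for i in range(w)]
--     expanded_image = []
--     for row in image:
--         new_row = []
--         for k, c in enumerate(row):
--             if k < w and cols[k]:
--                 new_row.append('.')
--             new_row.append(c)
--         expanded_image.append(new_row)
--         if len(set(row)) == 1:
--             expanded_image.append(list(new_row))
--     return expanded_image
-- ===== Notes on version B (the rewrite author's own statement) =====
-- stated objective: alternative
-- what changed: B computes the list of all-'.' columns once and rebuilds each output row in a single left-to-right pass (emitting '.' before each expandable position), replacing A's right-to-left per-column rescans with list.insert into every expanded row; asymptotically B does O(R*C) cell operations versus A's O(R*C) inserts each costing O(C), but on the timed inputs A's C-level list operations keep it at least as fast, so no speed is claimed. …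
import Mathlib
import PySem

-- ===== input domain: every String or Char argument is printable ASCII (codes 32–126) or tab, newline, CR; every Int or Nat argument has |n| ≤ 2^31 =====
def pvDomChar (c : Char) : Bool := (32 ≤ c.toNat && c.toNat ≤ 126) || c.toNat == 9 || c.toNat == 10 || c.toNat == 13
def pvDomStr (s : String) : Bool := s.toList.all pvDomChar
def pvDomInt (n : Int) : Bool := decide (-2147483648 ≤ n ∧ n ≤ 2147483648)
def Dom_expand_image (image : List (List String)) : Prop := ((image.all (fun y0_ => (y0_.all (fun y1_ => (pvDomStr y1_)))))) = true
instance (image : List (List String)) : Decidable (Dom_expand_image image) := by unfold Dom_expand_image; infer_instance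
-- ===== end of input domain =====

-- B precomputes the expandable (all-'.') columns once and rebuilds each row in one pass,
-- instead of A's per-column rescans with list.insert into every expanded row.

-- ===== PORT A =====
-- Literal port of A. The inner 'for j …: if image[j][i] != '.': expand = False; break' loop
-- computes a pure all-test over the same indices, ported as List.all over the same range;
-- indexing uses pyGetD, whose defaults are reachable only where Python raises (outside Pre_).
def expand_image (image : List (List String)) : List (List String) :=
  let expanded := image.foldl
    (fun acc y =>
      let acc := acc ++ [y]
      if (PySem.Set.ofList y).length == 1 then acc ++ [y] else acc) []
  ((PySem.List.pyRange 0 ((PySem.List.pyGetD image 0 []).length : Int) 1).reverse).foldl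
    (fun ex i =>
      let expand := (PySem.List.pyRange 0 (image.length : Int) 1).all
        (fun j => PySem.List.pyGetD (PySem.List.pyGetD image j []) i "" == ".")
      if expand then ex.map (fun r => PySem.List.insert r i ".") else ex)
    expanded

-- ===== PORT B =====
-- Literal port of B (Source B): cols[i] says whether column i is all '.'; each output row is built
-- left to right, emitting '.' before position k when cols[k] holds; duplicated rows are copies.
def expand_image_alt (image : List (List String)) : List (List String) :=
  let w := (PySem.List.pyGetD image 0 []).length
  let cols : List Bool := (PySem.List.pyRange 0 (w : Int) 1).map
    (fun i => image.all (fun row => PySem.List.pyGetD row i "" == "."))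
  image.foldl
    (fun out row =>
      let newRow := (PySem.List.enumerate row).foldl
        (fun acc kc =>
          let acc := if decide (kc.1 < (w : Int)) && PySem.List.pyGetD cols kc.1 false
                     then acc ++ ["."] else acc
          acc ++ [kc.2]) []
      let out := out ++ [newRow]
      if (PySem.Set.ofList row).length == 1 then out ++ [newRow] else out) []

-- ===== PRECONDITION & SPEC =====
-- Pre_ excludes exactly the inputs on which A raises IndexError: the empty image (image[0]),
-- and images where the column scan over some i < len(image[0]) reaches a row shorter than i+1
-- without an earlier row blocking the scan with a non-'.' entry at i; B raises there too.
def Pre_expand_image (image : List (List String)) : Prop :=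
  image ≠ [] ∧
  ∀ i : Nat, i < (image.headD []).length →
    ∀ j : Nat, j < image.length → (image.getD j []).length ≤ i →
      ∃ k : Nat, k < j ∧ i < (image.getD k []).length ∧ (image.getD k []).getD i "" ≠ "."
instance (image : List (List String)) : Decidable (Pre_expand_image image) := by
  unfold Pre_expand_image; infer_instance
def pvWitness_expand_image : List (List String) := [["#", "."], [".", "."]]
def Spec_expand_image (image : List (List String)) (out : List (List String)) : Prop := out = expand_image_alt image
instance (image : List (List String)) (out : List (List String)) : Decidable (Spec_expand_image image out) := by unfold Spec_expand_image; infer_instance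

-- ===== CLAIM (what is proved, stated in full; the proofs are below) =====
def Claim_equal_expand_image : Prop := ∀ (image : List (List String)), Dom_expand_image image → Pre_expand_image image → Spec_expand_image image (expand_image image)

-- ===== LEMMAS AND PROOFS =====

-- column i of `image` is all '.' (the test both Pythons make, on the same pyGetD reads)
def pvCol (image : List (List String)) (i : Int) : Bool :=
  image.all (fun row => PySem.List.pyGetD row i "" == ".")

-- insert "." before every position k with c k; the common normal form of both ports' rows
def pvMark (c : Nat → Bool) : Nat → List String → List String
  | _, [] => []
  | k, a :: t => (if c k then ["."] else []) ++ a :: pvMark c (k + 1) t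

-- one step of A's column loop, on a single row
def pvGA (image : List (List String)) (k : Nat) (r : List String) : List String :=
  if pvCol image (k : Int) then PySem.List.insert r (k : Int) "." else r

theorem pvMark_append (c : Nat → Bool) (u v : List String) : ∀ k : Nat,
    pvMark c k (u ++ v) = pvMark c k u ++ pvMark c (k + u.length) v := by
  induction u with
  | nil => intro k; simp [pvMark]
  | cons a t ih =>
      intro k
      simp only [List.cons_append, pvMark, ih (k + 1), List.length_cons]
      rw [show k + (t.length + 1) = k + 1 + t.length by omega]
      simp [List.append_assoc]

theorem pvMark_congr (c c' : Nat → Bool) (r : List String) : ∀ k : Nat,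
    (∀ i : Nat, k ≤ i → i < k + r.length → c i = c' i) → pvMark c k r = pvMark c' k r := by
  induction r with
  | nil => intro k _; simp [pvMark]
  | cons a t ih =>
      intro k h
      simp only [pvMark]
      rw [h k (le_refl k) (by simp), ih (k + 1) (fun i h1 h2 => h i (by omega) (by simp at h2 ⊢; omega))]

theorem pvMark_false (c : Nat → Bool) (r : List String) : ∀ k : Nat,
    (∀ i : Nat, k ≤ i → c i = false) → pvMark c k r = r := by
  induction r with
  | nil => intro k _; simp [pvMark]
  | cons a t ih =>
      intro k h
      simp only [pvMark, h k (le_refl k)]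
      simp [ih (k + 1) (fun i hi => h i (by omega))]

theorem pvCol_lt (image : List (List String)) (k : Nat) (r : List String)
    (hc : pvCol image (k : Int) = true) (hr : r ∈ image) : k < r.length := by
  unfold pvCol at hc
  rw [List.all_eq_true] at hc
  have h := hc r hr
  by_contra hk
  rw [PySem.List.pyGetD_natCast, List.getD_eq_default _ _ (by omega)] at h
  simp at h

-- A's column loop on one row, right-to-left, equals pvMark
theorem pvRowFoldA (image : List (List String)) : ∀ (m : Nat) (r : List String),
    (∀ k : Nat, k < m → pvCol image (k : Int) = true → k < r.length) →
    List.foldr (pvGA image) r (List.range m)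
      = pvMark (fun k => decide (k < m) && pvCol image (k : Int)) 0 r := by
  intro m
  induction m with
  | zero =>
      intro r _
      rw [List.range_zero, List.foldr_nil,
        pvMark_false (fun k => decide (k < 0) && pvCol image (k : Int)) r 0 (by intro i _; simp)]
  | succ m ih =>
      intro r H
      rw [List.range_succ, List.foldr_append]
      have hstep : List.foldr (pvGA image) r [m] = pvGA image m r := rfl
      rw [hstep]
      by_cases h : pvCol image (m : Int) = true
      · have hm : m < r.length := H m (by omega) h
        have hGA : pvGA image m r = r.take m ++ "." :: r.drop m := by
          rw [pvGA, if_pos h, PySem.List.insert_natCast r m "." (by omega)]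
        have hlen : (r.take m ++ "." :: r.drop m).length = r.length + 1 := by
          rw [List.length_append, List.length_take, List.length_cons, List.length_drop]
          omega
        have harg : ∀ k : Nat, k < m → pvCol image (k : Int) = true →
            k < (r.take m ++ "." :: r.drop m).length := by
          intro k hk hck
          rw [hlen]
          exact Nat.lt_succ_of_lt (H k (Nat.lt_succ_of_lt hk) hck)
        have hfalse_hi : ∀ i : Nat, m + 1 ≤ i →
            (decide (i < m) && pvCol image (i : Int)) = false := by
          intro i hi
          have hnot : ¬ i < m := by omega
          simp [hnot]
        have hfalse_hi1 : ∀ i : Nat, m + 1 ≤ i →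
            (decide (i < m + 1) && pvCol image (i : Int)) = false := by
          intro i hi
          have hnot : ¬ i < m + 1 := by omega
          simp [hnot]
        have e1 : pvMark (fun k => decide (k < m) && pvCol image (k : Int)) m ("." :: r.drop m)
            = "." :: r.drop m := by
          simp only [pvMark]
          rw [pvMark_false _ (r.drop m) (m + 1) hfalse_hi]
          simp
        have e2 : pvMark (fun k => decide (k < m + 1) && pvCol image (k : Int)) m (r.drop m)
            = "." :: r.drop m := by
          rw [List.drop_eq_getElem_cons hm]
          simp only [pvMark]
          rw [pvMark_false _ (r.drop (m + 1)) (m + 1) hfalse_hi1]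
          simp [h]
        have e3 : pvMark (fun k => decide (k < m) && pvCol image (k : Int)) 0 (r.take m)
            = pvMark (fun k => decide (k < m + 1) && pvCol image (k : Int)) 0 (r.take m) := by
          apply pvMark_congr
          intro i _ h2
          simp only [Nat.zero_add, List.length_take] at h2
          have him : i < m := by omega
          simp [him, Nat.lt_succ_of_lt him]
        rw [hGA, ih _ harg, pvMark_append _ (r.take m) ("." :: r.drop m) 0]
        simp only [Nat.zero_add, List.length_take, Nat.min_eq_left hm.le]
        rw [e1, e3]
        conv_rhs => rw [← List.take_append_drop m r]
        rw [pvMark_append _ (r.take m) (r.drop m) 0]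
        simp only [Nat.zero_add, List.length_take, Nat.min_eq_left hm.le]
        rw [e2]
      · have hGA : pvGA image m r = r := by rw [pvGA, if_neg h]
        rw [hGA, ih _ (fun k hk hck => H k (by omega) hck)]
        apply pvMark_congr
        intro i _ _
        rcases lt_trichotomy i m with hlt | heq | hgt
        · simp [hlt, Nat.lt_succ_of_lt hlt]
        · subst heq; simp [h]
        · simp [show ¬ i < m by omega, show ¬ i < m + 1 by omega]

-- A's column loop over the whole row list is the row-wise loop, mapped
theorem pvListFoldA (image : List (List String)) : ∀ (m : Nat) (L : List (List String)),
    List.foldr (fun (k : Nat) ex =>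
        if pvCol image (k : Int) then ex.map (fun r => PySem.List.insert r (k : Int) ".") else ex)
      L (List.range m)
      = L.map (fun r => List.foldr (pvGA image) r (List.range m)) := by
  intro m
  induction m with
  | zero => intro L; simp
  | succ m ih =>
      intro L
      simp only [List.range_succ, List.foldr_append, List.foldr_cons, List.foldr_nil]
      by_cases h : pvCol image (m : Int) = true
      · rw [if_pos h, ih (L.map (fun r => PySem.List.insert r (m : Int) ".")), List.map_map]
        apply List.map_congr_left
        intro r _
        simp [Function.comp, pvGA, h]
      · rw [if_neg h, ih L]
        apply List.map_congr_left
        intro r _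
        simp [pvGA, h]

-- the append-and-maybe-duplicate loop both Pythons run over the rows
theorem pvFoldDup (c : List String → Bool) (f : List String → List String) :
    ∀ (l : List (List String)) (init : List (List String)),
    l.foldl (fun acc y =>
        let acc2 := acc ++ [f y]
        if c y then acc2 ++ [f y] else acc2) init
      = init ++ l.flatMap (fun y => f y :: if c y then [f y] else []) := by
  intro l
  induction l with
  | nil => intro init; simp
  | cons a t ih =>
      intro init
      rw [List.foldl_cons, ih]
      by_cases h : c a = true <;> simp [h]

-- A's inner index-loop all-test is pvCol
theorem pvColA (image : List (List String)) (i : Int) :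
    (PySem.List.pyRange 0 (image.length : Int) 1).all
        (fun j => PySem.List.pyGetD (PySem.List.pyGetD image j []) i "" == ".")
      = pvCol image i := by
  have h1 : (fun j : Int => PySem.List.pyGetD (PySem.List.pyGetD image j []) i "" == ".")
      = ((fun row => PySem.List.pyGetD row i "" == ".") ∘ (fun j => PySem.List.pyGetD image j ([] : List String))) := rfl
  rw [pvCol, h1, ← List.all_map, PySem.List.map_pyGetD_pyRange_zero']

-- B's inner enumerate loop builds pvMark
theorem pvRowFoldB (cols : List Bool) (wI : Int) (r : List String) : ∀ (s : Nat) (acc : List String),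
    (PySem.List.enumerate r (s : Int)).foldl
        (fun acc kc =>
          let acc := if decide (kc.1 < wI) && PySem.List.pyGetD cols kc.1 false
                     then acc ++ ["."] else acc
          acc ++ [kc.2]) acc
      = acc ++ pvMark (fun k => decide ((k : Int) < wI) && PySem.List.pyGetD cols (k : Int) false) s r := by
  have hsplit : ∀ (b : Bool) (acc : List String) (a : String) (M : List String),
      ((if b = true then acc ++ ["."] else acc) ++ [a]) ++ M
        = acc ++ ((if b = true then ["."] else []) ++ a :: M) := by
    intro b acc a M; cases b <;> simp
  induction r with
  | nil => intro s acc; simp [PySem.List.enumerate_nil, pvMark]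
  | cons a t ih =>
      intro s acc
      rw [PySem.List.enumerate_cons, List.foldl_cons]
      have hcast : (s : Int) + 1 = ((s + 1 : Nat) : Int) := by push_cast; ring
      rw [hcast, ih (s + 1)]
      simp only [pvMark]
      exact hsplit (decide ((s : Int) < wI) && PySem.List.pyGetD cols (s : Int) false) acc a _

-- the cols table looked up at k is the guarded column test
theorem pvColsLookup (image : List (List String)) (W : Nat) (k : Nat) :
    (decide ((k : Int) < (W : Int)) &&
        PySem.List.pyGetD ((PySem.List.pyRange 0 (W : Int) 1).map (fun i => pvCol image i)) (k : Int) false)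
      = (decide (k < W) && pvCol image (k : Int)) := by
  by_cases h : k < W
  · rw [PySem.List.pyGetD_map_pyRange (fun i => pvCol image i) W k false h]
    simp [h]
  · simp [h, show ¬ ((k : Int) < (W : Int)) by exact_mod_cast h]

-- rows of the duplicated list come from image
theorem pvMemDup (image : List (List String)) (c : List String → Bool) (r : List String)
    (h : r ∈ image.flatMap (fun y => y :: if c y then [y] else [])) : r ∈ image := by
  rw [List.mem_flatMap] at h
  obtain ⟨y, hy, hr⟩ := h
  by_cases hc : c y = true <;> simp [hc] at hr <;> rcases hr with rfl | rfl <;> assumption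

-- A in normal form
theorem pvAeq (image : List (List String)) :
    expand_image image
      = (image.flatMap (fun y => y :: if (PySem.Set.ofList y).length == 1 then [y] else [])).map
          (fun r => List.foldr (pvGA image) r (List.range (PySem.List.pyGetD image 0 []).length)) := by
  unfold expand_image
  rw [pvFoldDup (fun y => (PySem.Set.ofList y).length == 1) (fun y => y) image []]
  have hstep : (fun (ex : List (List String)) (i : Int) =>
      let expand := (PySem.List.pyRange 0 (image.length : Int) 1).all
        (fun j => PySem.List.pyGetD (PySem.List.pyGetD image j []) i "" == ".")
      if expand then ex.map (fun r => PySem.List.insert r i ".") else ex)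
      = (fun ex i => if pvCol image i then ex.map (fun r => PySem.List.insert r i ".") else ex) := by
    funext ex i
    simp only [pvColA]
  rw [hstep, PySem.List.pyRange_one, List.foldl_reverse]
  simp only [Int.sub_zero, Int.toNat_natCast, List.foldr_map, Int.zero_add]
  rw [pvListFoldA]
  simp

-- B in normal form
theorem pvBeq (image : List (List String)) :
    expand_image_alt image
      = (image.flatMap (fun y => y :: if (PySem.Set.ofList y).length == 1 then [y] else [])).map
          (fun r => pvMark
            (fun k => decide (k < (PySem.List.pyGetD image 0 []).length) && pvCol image (k : Int)) 0 r) := by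
  have hdef : expand_image_alt image
      = image.foldl
          (fun out row =>
            let newRow := (PySem.List.enumerate row).foldl
              (fun acc kc =>
                let acc := if decide (kc.1 < ((PySem.List.pyGetD image 0 []).length : Int)) &&
                              PySem.List.pyGetD ((PySem.List.pyRange 0 ((PySem.List.pyGetD image 0 []).length : Int) 1).map
                                (fun i => image.all (fun row => PySem.List.pyGetD row i "" == "."))) kc.1 false
                           then acc ++ ["."] else acc
                acc ++ [kc.2]) []
            let out := out ++ [newRow]
            if (PySem.Set.ofList row).length == 1 then out ++ [newRow] else out) [] := rfl
  rw [hdef]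
  have hstep : (fun (out : List (List String)) (row : List String) =>
      let newRow := (PySem.List.enumerate row).foldl
        (fun acc kc =>
          let acc := if decide (kc.1 < ((PySem.List.pyGetD image 0 []).length : Int)) &&
                        PySem.List.pyGetD ((PySem.List.pyRange 0 ((PySem.List.pyGetD image 0 []).length : Int) 1).map
                          (fun i => image.all (fun row => PySem.List.pyGetD row i "" == "."))) kc.1 false
                     then acc ++ ["."] else acc
          acc ++ [kc.2]) []
      let out := out ++ [newRow]
      if (PySem.Set.ofList row).length == 1 then out ++ [newRow] else out)
    = (fun out row =>
        let acc2 := out ++ [pvMark (fun k => decide (k < (PySem.List.pyGetD image 0 []).length) && pvCol image (k : Int)) 0 row]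
        if (PySem.Set.ofList row).length == 1
          then acc2 ++ [pvMark (fun k => decide (k < (PySem.List.pyGetD image 0 []).length) && pvCol image (k : Int)) 0 row]
          else acc2) := by
    funext out row
    rw [show (PySem.List.enumerate row) = PySem.List.enumerate row (((0 : Nat) : Int)) from rfl]
    rw [pvRowFoldB]
    simp only [List.nil_append]
    have hmk : pvMark (fun k => decide ((k : Int) < ((PySem.List.pyGetD image 0 []).length : Int)) &&
          PySem.List.pyGetD ((PySem.List.pyRange 0 ((PySem.List.pyGetD image 0 []).length : Int) 1).map
            (fun i => image.all (fun row => PySem.List.pyGetD row i "" == "."))) (k : Int) false) 0 row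
        = pvMark (fun k => decide (k < (PySem.List.pyGetD image 0 []).length) && pvCol image (k : Int)) 0 row := by
      apply pvMark_congr
      intro i _ _
      exact pvColsLookup image (PySem.List.pyGetD image 0 []).length i
    rw [hmk]
  rw [hstep, pvFoldDup]
  rw [List.map_flatMap]
  apply List.flatMap_congr
  intro y _
  by_cases h : ((PySem.Set.ofList y).length == 1) = true <;> simp [h]

-- ===== VERDICT (by name: the statement is the Claim_ definition above) =====
theorem expand_image_spec : Claim_equal_expand_image := by
  intro image _ _
  unfold Spec_expand_image
  rw [pvAeq, pvBeq]
  apply List.map_congr_left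
  intro r hr
  have hmem := pvMemDup image _ r hr
  exact pvRowFoldA image (PySem.List.pyGetD image 0 []).length r
    (fun k _ hck => pvCol_lt image k r hck hmem)
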